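-- pv_equiv track=rewrite | github.com/oaao/advent-of-code | 2020/python/15/15.py | generate_seq
-- ===== SOURCE A (Python) =====
-- def generate_seq(initial, turns=0):
--
-- 	seen = set(initial[:-1])
-- 	seq  = list(initial)
--
-- 	for i in range(len(initial), turns):
--
-- 		n = seq[i-1]
--
-- 		if n not in seen:
-- 			seq.append(0)
-- 			seen.add(n)
-- 		else:
-- 			a, b = [i for i, x in enumerate(seq) if x == n][-2:]
-- 			seq.append(b-a)
--
-- 	return seq[-1]
-- ===== SOURCE B (Python) =====
-- def generate_seq(initial, turns=0):
--     # O(turns): dict mapping number -> index of its most recent earlier occurrence.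
--     last = {v: i for i, v in enumerate(initial[:-1])}
--     cur = initial[-1]
--     for i in range(len(initial), turns):
--         prev = last.get(cur)
--         last[cur] = i - 1
--         cur = 0 if prev is None else (i - 1) - prev
--     return cur
-- ===== Notes on version B (the rewrite author's own statement) =====
-- stated objective: alternative
-- what changed: Replaces A's per-turn rescan of the whole spoken sequence (list comprehension over enumerate(seq) every turn) by a dict mapping each number to the index where it was last spoken, updated incrementally, carrying only the current number instead of the whole sequence.
import Mathlib
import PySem

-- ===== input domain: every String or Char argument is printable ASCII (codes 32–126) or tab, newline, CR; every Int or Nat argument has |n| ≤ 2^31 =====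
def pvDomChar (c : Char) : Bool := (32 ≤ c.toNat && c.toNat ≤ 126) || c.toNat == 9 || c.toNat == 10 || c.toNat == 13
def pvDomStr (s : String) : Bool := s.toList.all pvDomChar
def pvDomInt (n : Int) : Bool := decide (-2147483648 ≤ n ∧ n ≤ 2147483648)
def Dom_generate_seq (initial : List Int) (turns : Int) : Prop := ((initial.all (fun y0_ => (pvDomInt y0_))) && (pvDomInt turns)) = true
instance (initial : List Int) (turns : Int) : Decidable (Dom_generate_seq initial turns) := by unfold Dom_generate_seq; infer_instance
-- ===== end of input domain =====

-- B replaces A's per-turn rescan of the whole sequence by a dict of last-spoken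
-- indices updated incrementally; return value only (neither side mutates its arguments).

-- ===== PORT A =====
-- loop body of A's for-loop (literal transliteration of the body)
def stepA (st : PySem.Set Int × List Int) (i : Int) : PySem.Set Int × List Int :=
  let seen := st.1
  let seq := st.2
  let n := (PySem.List.pyGet? seq (i - 1)).getD 0  -- IndexError impossible: under Pre_ the loop keeps len(seq) = i
  if !(PySem.Set.contains seen n) then
    (PySem.Set.add seen n, seq ++ [0])
  else
    match PySem.List.slice (((PySem.List.enumerate seq 0).filter (fun p => p.2 == n)).map (fun p => p.1)) (some (-2)) none with
    | [a, b] => (seen, seq ++ [b - a])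
    | _ => (seen, seq)  -- Python's 'a, b = ...' would raise here; never reached from A's initial state

def generate_seq (initial : List Int) (turns : Int) : Int :=
  let seen := PySem.Set.ofList (PySem.List.slice initial none (some (-1)))
  let seq := initial
  let final := (PySem.List.pyRange (initial.length : Int) turns 1).foldl stepA (seen, seq)
  (PySem.List.pyGet? final.2 (-1)).getD 0  -- IndexError (empty initial) excluded by Pre_

-- ===== PORT B =====
-- loop body of B's for-loop
def stepB (st : PySem.Dict Int Int × Int) (i : Int) : PySem.Dict Int Int × Int :=
  let prev := st.1.get? st.2
  let last := st.1.insert st.2 (i - 1)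
  let cur := match prev with
    | none => 0
    | some p => (i - 1) - p
  (last, cur)

def generate_seq_alt (initial : List Int) (turns : Int) : Int :=
  let last := (PySem.List.enumerate (PySem.List.slice initial none (some (-1))) 0).foldl
      (fun (d : PySem.Dict Int Int) p => d.insert p.2 p.1) PySem.Dict.empty
  let cur := (PySem.List.pyGet? initial (-1)).getD 0  -- IndexError (empty initial) excluded by Pre_
  ((PySem.List.pyRange (initial.length : Int) turns 1).foldl stepB (last, cur)).2

-- ===== PRECONDITION & SPEC =====
-- Pre_ excludes only the empty initial list, on which A raises IndexError (seq[-1]); B raises there too.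
def Pre_generate_seq (initial : List Int) (turns : Int) : Prop := initial ≠ []
instance (initial : List Int) (turns : Int) : Decidable (Pre_generate_seq initial turns) := by
  unfold Pre_generate_seq; infer_instance

def pvWitness_generate_seq : List Int × Int := ([0, 3, 6], 12)

def Spec_generate_seq (initial : List Int) (turns : Int) (out : Int) : Prop := out = generate_seq_alt initial turns
instance (initial : List Int) (turns : Int) (out : Int) : Decidable (Spec_generate_seq initial turns out) := by unfold Spec_generate_seq; infer_instance

-- ===== CLAIM (what is proved, stated in full; the proofs are below) =====
def Claim_equal_generate_seq : Prop := ∀ (initial : List Int) (turns : Int), Dom_generate_seq initial turns → Pre_generate_seq initial turns → Spec_generate_seq initial turns (generate_seq initial turns)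

-- ===== LEMMAS AND PROOFS =====

def occ (l : List Int) (v : Int) : List Int :=
  ((PySem.List.enumerate l 0).filter (fun p => p.2 == v)).map (fun p => p.1)

lemma occ_append (l : List Int) (x v : Int) :
    occ (l ++ [x]) v = occ l v ++ (if x = v then [(l.length : Int)] else []) := by
  unfold occ
  rw [PySem.List.enumerate_append]
  simp [PySem.List.enumerate_cons, PySem.List.enumerate_nil, List.filter_append]
  split_ifs with h <;> simp [h]

lemma occ_eq_nil_iff (l : List Int) (v : Int) : occ l v = [] ↔ v ∉ l := by
  induction l using List.reverseRecOn with
  | nil => simp [occ, PySem.List.enumerate_nil]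
  | append_singleton l x ih =>
    rw [occ_append]
    rcases eq_or_ne x v with h | h
    · simp [h, ih]
    · simp [h, ih, Ne.symm h]

lemma dictOfEnum_get? (l : List Int) (v : Int) :
    ((PySem.List.enumerate l 0).foldl (fun (d : PySem.Dict Int Int) p => d.insert p.2 p.1) PySem.Dict.empty).get? v
      = (occ l v).getLast? := by
  induction l using List.reverseRecOn with
  | nil => simp [occ, PySem.List.enumerate_nil, PySem.Dict.get?_empty]
  | append_singleton l x ih =>
    rw [PySem.List.enumerate_append, List.foldl_append, occ_append]
    simp only [PySem.List.enumerate_cons, PySem.List.enumerate_nil, List.foldl_cons, List.foldl_nil]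
    rcases eq_or_ne v x with h | h
    · subst h
      rw [PySem.Dict.get?_insert_self]
      simp
    · rw [PySem.Dict.get?_insert_of_ne (hne := h), ih]
      simp [Ne.symm h]


def LoopInv (seq : List Int) (seen : PySem.Set Int) (last : PySem.Dict Int Int) (cur : Int) : Prop :=
  seq.getLast? = some cur ∧
  (∀ v, PySem.Set.contains seen v = true ↔ v ∈ seq.dropLast) ∧
  (∀ v, last.get? v = (occ seq.dropLast v).getLast?)

lemma step_inv (seq : List Int) (seen : PySem.Set Int) (last : PySem.Dict Int Int) (cur : Int)
    (h : LoopInv seq seen last cur) :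
    (stepA (seen, seq) (seq.length : Int)).2 = seq ++ [(stepB (last, cur) (seq.length : Int)).2] ∧
    LoopInv (stepA (seen, seq) (seq.length : Int)).2 (stepA (seen, seq) (seq.length : Int)).1
        (stepB (last, cur) (seq.length : Int)).1 (stepB (last, cur) (seq.length : Int)).2 := by
  obtain ⟨h1, h2, h3⟩ := h
  obtain ⟨L, rfl⟩ : ∃ L, seq = L ++ [cur] := by
    rcases List.getLast?_eq_some_iff.mp h1 with ⟨L, hL⟩; exact ⟨L, hL⟩
  have hdrop : (L ++ [cur]).dropLast = L := by simp
  rw [hdrop] at h2 h3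
  -- the index and the element A reads: seq[i-1] is the last element, = B's cur
  have hidx : ((L ++ [cur]).length : Int) - 1 = (L.length : Int) := by
    simp
  have hn : (PySem.List.pyGet? (L ++ [cur]) (((L ++ [cur]).length : Int) - 1)).getD 0 = cur := by
    rw [hidx, PySem.List.pyGet?_natCast]
    simp
  by_cases hc : cur ∈ L
  · -- cur spoken before: A rescans the sequence, B looks the index up in the dict
    have hcont : PySem.Set.contains seen cur = true := (h2 cur).mpr hc
    obtain ⟨p, hp⟩ : ∃ p, (occ L cur).getLast? = some p := by
      cases ho : (occ L cur).getLast? with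
      | none => exact absurd ((occ_eq_nil_iff L cur).mp (List.getLast?_eq_none_iff.mp ho)) (by simp [hc])
      | some p => exact ⟨p, rfl⟩
    obtain ⟨M, hM⟩ : ∃ M, occ L cur = M ++ [p] := by
      rcases List.getLast?_eq_some_iff.mp hp with ⟨M, hM⟩; exact ⟨M, hM⟩
    have hocc : occ (L ++ [cur]) cur = M ++ [p, (L.length : Int)] := by
      rw [occ_append]; simp [hM]
    have hslice : PySem.List.slice (occ (L ++ [cur]) cur) (some (-2)) none = [p, (L.length : Int)] := by
      rw [PySem.List.slice_from_neg_ofNat _ 2 (by omega), hocc]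
      have : (M ++ [p, (L.length : Int)]).length - 2 = M.length := by simp
      rw [this, List.drop_left]
    have hA : stepA (seen, L ++ [cur]) (((L ++ [cur]).length : Int))
        = (seen, (L ++ [cur]) ++ [(L.length : Int) - p]) := by
      show (if !(PySem.Set.contains seen ((PySem.List.pyGet? (L ++ [cur]) (((L ++ [cur]).length : Int) - 1)).getD 0)) then _ else _) = _
      rw [hn, hcont]
      have he : (((PySem.List.enumerate (L ++ [cur]) 0).filter (fun p => p.2 == cur)).map (fun p => p.1)) = occ (L ++ [cur]) cur := rfl
      rw [he, hslice]
      simp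
    have hB : stepB (last, cur) (((L ++ [cur]).length : Int))
        = (last.insert cur (L.length : Int), (L.length : Int) - p) := by
      show ((last, cur).1.insert (last, cur).2 ((((L ++ [cur]).length : Int)) - 1),
        match last.get? cur with | none => 0 | some p => ((((L ++ [cur]).length : Int)) - 1) - p) = _
      rw [h3, hp, hidx]
    rw [hA, hB]
    refine ⟨rfl, by simp, fun v => ?_, fun v => ?_⟩
    · rw [h2 v]
      simp only [List.dropLast_concat]
      constructor
      · intro hv; simp at hv ⊢; tauto
      · intro hv; rcases List.mem_append.mp hv with hv | hv
        · exact hv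
        · simp at hv; exact hv ▸ hc
    · simp only [List.dropLast_concat]
      rcases eq_or_ne v cur with rfl | hne
      · rw [PySem.Dict.get?_insert_self, occ_append]; simp
      · rw [PySem.Dict.get?_insert_of_ne (hne := hne), h3, occ_append]
        simp [Ne.symm hne]
  · -- cur is new: A appends 0, B finds nothing in the dict
    have hcont : PySem.Set.contains seen cur = false := by
      cases hb : PySem.Set.contains seen cur
      · rfl
      · exact absurd ((h2 cur).mp hb) hc
    have hA : stepA (seen, L ++ [cur]) (((L ++ [cur]).length : Int))
        = (PySem.Set.add seen cur, (L ++ [cur]) ++ [0]) := by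
      show (if !(PySem.Set.contains seen ((PySem.List.pyGet? (L ++ [cur]) (((L ++ [cur]).length : Int) - 1)).getD 0)) then _ else _) = _
      rw [hn, hcont]
      simp
    have hB : stepB (last, cur) (((L ++ [cur]).length : Int))
        = (last.insert cur (L.length : Int), 0) := by
      show ((last, cur).1.insert (last, cur).2 ((((L ++ [cur]).length : Int)) - 1),
        match last.get? cur with | none => 0 | some p => ((((L ++ [cur]).length : Int)) - 1) - p) = _
      rw [h3, (occ_eq_nil_iff L cur).mpr hc, hidx]
      rfl
    rw [hA, hB]
    refine ⟨rfl, by simp, fun v => ?_, fun v => ?_⟩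
    · simp only [List.dropLast_concat]
      rw [PySem.Set.contains_iff, PySem.Set.mem_add]
      rw [← PySem.Set.contains_iff, h2 v]
      simp
    · simp only [List.dropLast_concat]
      rcases eq_or_ne v cur with rfl | hne
      · rw [PySem.Dict.get?_insert_self, occ_append]
        simp [(occ_eq_nil_iff _ _).mpr hc]
      · rw [PySem.Dict.get?_insert_of_ne (hne := hne), h3, occ_append]
        simp [Ne.symm hne]

lemma loop_inv (m : Nat) : ∀ (b : Int) (seq : List Int) (seen : PySem.Set Int) (last : PySem.Dict Int Int) (cur : Int),
    (b - (seq.length : Int)).toNat = m → LoopInv seq seen last cur →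
    LoopInv ((PySem.List.pyRange (seq.length : Int) b 1).foldl stepA (seen, seq)).2
        ((PySem.List.pyRange (seq.length : Int) b 1).foldl stepA (seen, seq)).1
        ((PySem.List.pyRange (seq.length : Int) b 1).foldl stepB (last, cur)).1
        ((PySem.List.pyRange (seq.length : Int) b 1).foldl stepB (last, cur)).2 := by
  induction m with
  | zero =>
    intro b seq seen last cur hm h
    rw [PySem.List.pyRange_one_eq_nil (by omega)]
    exact h
  | succ m ih =>
    intro b seq seen last cur hm h
    rw [PySem.List.pyRange_one_cons (by omega), List.foldl_cons, List.foldl_cons]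
    obtain ⟨hlen, hinv⟩ := step_inv seq seen last cur h
    have hstA : stepA (seen, seq) (seq.length : Int)
        = ((stepA (seen, seq) (seq.length : Int)).1, (stepA (seen, seq) (seq.length : Int)).2) := rfl
    have hstB : stepB (last, cur) (seq.length : Int)
        = ((stepB (last, cur) (seq.length : Int)).1, (stepB (last, cur) (seq.length : Int)).2) := rfl
    rw [hstA, hstB]
    have hlen' : ((((stepA (seen, seq) (seq.length : Int)).2).length : Int)) = (seq.length : Int) + 1 := by
      rw [hlen]; simp
    rw [← hlen']
    exact ih b _ _ _ _ (by rw [hlen']; omega) hinv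


-- ===== VERDICT (by name: the statement is the Claim_ definition above) =====
theorem generate_seq_spec : Claim_equal_generate_seq := by
  intro initial turns _ hne
  unfold Pre_generate_seq at hne
  unfold Spec_generate_seq generate_seq generate_seq_alt
  simp only []
  obtain ⟨L, c, rfl⟩ : ∃ L c, initial = L ++ [c] :=
    ⟨initial.dropLast, initial.getLast hne, (List.dropLast_concat_getLast hne).symm⟩
  have hcur : (PySem.List.pyGet? (L ++ [c]) (-1)).getD 0 = c := by
    rw [PySem.List.pyGet?_neg_one]; simp
  have hinv : LoopInv (L ++ [c])
      (PySem.Set.ofList (PySem.List.slice (L ++ [c]) none (some (-1))))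
      ((PySem.List.enumerate (PySem.List.slice (L ++ [c]) none (some (-1))) 0).foldl
          (fun (d : PySem.Dict Int Int) p => d.insert p.2 p.1) PySem.Dict.empty)
      ((PySem.List.pyGet? (L ++ [c]) (-1)).getD 0) := by
    rw [hcur, PySem.List.slice_to_neg_one]
    refine ⟨by simp, ?_, ?_⟩
    · intro v; rw [PySem.Set.contains_iff, PySem.Set.mem_ofList]
    · intro v; rw [dictOfEnum_get?]
  have := loop_inv ((turns - ((L ++ [c]).length : Int)).toNat) turns (L ++ [c]) _ _ _ rfl hinv
  obtain ⟨hlast, -, -⟩ := this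
  rw [PySem.List.pyGet?_neg_one, hlast]
  rfl
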